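-- pv_equiv track=rewrite | github.com/Darkbunny486/Highschool_Projects | AS-621021-Base Fibonacci.py | convert_decimal
-- ===== SOURCE A (Python) =====
-- def convert_decimal (num):
--     """Converting a base fibonacci into a decimal number
--
--     Args:
--                 num(str): Base fibonacci that will be converted
--
--     Returns:
--                 final(int): The decimal number
--     """
--
--     n1 = 1
--     n2 = 1
--     count = 0
--     final =0
--     fib = []
--
--     while (count <= len(num)):
--         fib = fib + [n1]
--         nth = n1 + n2
--         n1 = n2
--         n2 = nth
--         count += 1
--     fib.remove(fib[0])
--
--     for a in range (len(num)):
--         if (num[a-1] == '1'):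
--             final = final + fib[-a]
--     return final
-- ===== SOURCE B (Python) =====
-- def convert_decimal(num):
--     total = 0
--     a, b = 1, 2
--     for ch in reversed(num):
--         if ch == '1':
--             total += a
--         a, b = b, a + b
--     return total
-- ===== Notes on version B (the rewrite author's own statement) =====
-- stated objective: simpler
-- what changed: B drops A's precomputed Fibonacci list, its remove-first fixup and its quirky negative indexing (num[a-1], fib[-a]); it makes one reverse pass over the string, generating the Fibonacci weights on the fly in two running variables.
import Mathlib
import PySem

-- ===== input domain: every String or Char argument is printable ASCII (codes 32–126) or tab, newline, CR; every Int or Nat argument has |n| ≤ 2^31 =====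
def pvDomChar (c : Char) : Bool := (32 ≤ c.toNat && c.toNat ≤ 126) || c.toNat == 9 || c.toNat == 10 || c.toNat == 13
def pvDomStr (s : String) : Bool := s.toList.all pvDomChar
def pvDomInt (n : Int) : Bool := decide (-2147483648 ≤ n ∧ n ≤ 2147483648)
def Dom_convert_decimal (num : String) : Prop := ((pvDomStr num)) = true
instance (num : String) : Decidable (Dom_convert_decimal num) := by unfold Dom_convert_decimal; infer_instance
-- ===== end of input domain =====

-- B replaces A's precomputed-and-reverse-indexed Fibonacci list by a single reverse
-- pass that generates the weights on the fly (objective: simpler; same return value).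

-- ===== PORT A =====
-- A's while loop runs (len(num)+1 - count) more iterations; ported as recursion on that count
def pvFibLoop (n1 n2 : Int) (fib : List Int) (r : Nat) : List Int :=
  match r with
  | 0 => fib
  | r + 1 => pvFibLoop n2 (n1 + n2) (fib ++ [n1]) r

-- indexing is ported with pyGetD / .getD []: every index A takes is in range on every
-- input (fib0 is nonempty and |a-1|, |-a| are within bounds — proved below), so the
-- defaults are never used and the port is exact
def convert_decimal (num : String) : Int :=
  let l := num.toList
  let fib0 := pvFibLoop 1 1 [] (l.length + 1)
  let fib := ((PySem.List.pyGet? fib0 0).bind (fun v => PySem.List.remove? fib0 v)).getD []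
  (PySem.List.pyRange 0 (l.length : Int) 1).foldl
    (fun final a =>
      if PySem.List.pyGetD l (a - 1) ' ' == '1'
      then final + PySem.List.pyGetD fib (-a) 0
      else final) 0

-- ===== PORT B =====
def convert_decimal_alt (num : String) : Int :=
  (num.toList.reverse.foldl
    (fun (st : Int × Int × Int) ch =>
      ((if ch == '1' then st.1 + st.2.1 else st.1), st.2.2, st.2.1 + st.2.2))
    (0, 1, 2)).1

-- ===== PRECONDITION & SPEC =====
def Spec_convert_decimal (num : String) (out : Int) : Prop := out = convert_decimal_alt num
instance (num : String) (out : Int) : Decidable (Spec_convert_decimal num out) := by unfold Spec_convert_decimal; infer_instance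

-- ===== CLAIM (what is proved, stated in full; the proofs are below) =====
def Claim_equal_convert_decimal : Prop := ∀ (num : String), Dom_convert_decimal num → Spec_convert_decimal num (convert_decimal num)

-- ===== LEMMAS AND PROOFS =====

-- the Fibonacci sequence A's while loop appends, generated functionally
def pvGen (a b : Int) : Nat → List Int
  | 0 => []
  | r + 1 => a :: pvGen b (a + b) r

-- the k-th Fibonacci weight starting from (a, b)
def pvW (a b : Int) : Nat → Int
  | 0 => a
  | j + 1 => pvW b (a + b) j

-- B's running sum: value of the (already reversed) digit list with weights from (a, b)
def pvS : List Char → Int → Int → Int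
  | [], _, _ => 0
  | c :: l, a, b => (if c == '1' then a else 0) + pvS l b (a + b)

theorem pvFibLoop_eq (r : Nat) : ∀ (a b : Int) (fib : List Int),
    pvFibLoop a b fib r = fib ++ pvGen a b r := by
  induction r with
  | zero => intro a b fib; simp [pvFibLoop, pvGen]
  | succ r ih => intro a b fib; simp [pvFibLoop, pvGen, ih]

theorem pvGen_length (r : Nat) : ∀ a b, (pvGen a b r).length = r := by
  induction r with
  | zero => intro a b; rfl
  | succ r ih => intro a b; simp [pvGen, ih]

theorem pvGen_getD (r : Nat) : ∀ (a b : Int) (j : Nat), j < r →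
    (pvGen a b r).getD j 0 = pvW a b j := by
  induction r with
  | zero => intro a b j h; omega
  | succ r ih =>
    intro a b j h
    cases j with
    | zero => rfl
    | succ j => simp only [pvGen, List.getD_cons_succ, pvW]; exact ih b (a + b) j (by omega)

theorem pvS_fold (l : List Char) : ∀ (t a b : Int),
    (l.foldl (fun (st : Int × Int × Int) ch =>
      ((if ch == '1' then st.1 + st.2.1 else st.1), st.2.2, st.2.1 + st.2.2)) (t, a, b)).1
    = t + pvS l a b := by
  induction l with
  | nil => intro t a b; simp [pvS]
  | cons c l ih =>
    intro t a b
    simp only [List.foldl_cons, pvS, ih]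
    split <;> ring

theorem pvS_eq_sum (l : List Char) : ∀ (a b : Int),
    pvS l a b = ∑ j ∈ Finset.range l.length, (if l.getD j ' ' == '1' then pvW a b j else 0) := by
  induction l with
  | nil => intro a b; simp [pvS]
  | cons c l ih =>
    intro a b
    rw [pvS, ih b (a + b)]
    rw [List.length_cons, Finset.sum_range_succ']
    simp only [List.getD_cons_succ, List.getD_cons_zero, pvW]
    ring

theorem pv_sum_list_range (n : Nat) (f : Nat → Int) :
    ((List.range n).map f).sum = ∑ j ∈ Finset.range n, f j := by
  induction n with
  | zero => simp
  | succ n ih => simp [List.range_succ, Finset.sum_range_succ, ih]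

-- B's value as a weighted sum over the original (unreversed) digit list
theorem alt_eq_sum (num : String) :
    convert_decimal_alt num =
      ∑ j ∈ Finset.range num.toList.length,
        (if num.toList.getD (num.toList.length - 1 - j) ' ' == '1' then pvW 1 2 j else 0) := by
  unfold convert_decimal_alt
  rw [pvS_fold, pvS_eq_sum]
  simp only [List.length_reverse, zero_add]
  apply Finset.sum_congr rfl
  intro j hj
  rw [Finset.mem_range] at hj
  congr 2
  rw [List.getD_eq_getElem?_getD, List.getD_eq_getElem?_getD, List.getElem?_reverse hj]

theorem pv_main (l : List Char) :
    (PySem.List.pyRange 0 (l.length : Int) 1).foldl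
      (fun final a =>
        if PySem.List.pyGetD l (a - 1) ' ' == '1'
        then final + PySem.List.pyGetD (pvGen 1 2 l.length) (-a) 0
        else final) 0
    = ∑ j ∈ Finset.range l.length,
        (if l.getD (l.length - 1 - j) ' ' == '1' then pvW 1 2 j else 0) := by
  rcases Nat.eq_zero_or_pos l.length with h0 | hpos
  · rw [h0]; simp [PySem.List.pyRange_one_eq_nil]
  · have hbody : (fun (final a : Int) =>
        if PySem.List.pyGetD l (a - 1) ' ' == '1'
        then final + PySem.List.pyGetD (pvGen 1 2 l.length) (-a) 0
        else final)
      = (fun (final a : Int) =>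
        final + (if PySem.List.pyGetD l (a - 1) ' ' == '1'
                 then PySem.List.pyGetD (pvGen 1 2 l.length) (-a) 0 else 0)) := by
      funext final a; split <;> simp
    rw [hbody, PySem.List.foldl_add, PySem.List.pyRange_one]
    simp only [sub_zero, Int.toNat_natCast, List.map_map, zero_add]
    rw [pv_sum_list_range]
    obtain ⟨m, hm⟩ : ∃ m, l.length = m + 1 := ⟨l.length - 1, by omega⟩
    rw [hm, Finset.sum_range_succ', Finset.sum_range_succ']
    have hGlen : (pvGen 1 2 l.length).length = l.length := pvGen_length l.length 1 2
    congr 1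
    · rw [← Finset.sum_range_reflect]
      apply Finset.sum_congr rfl
      intro j hj
      rw [Finset.mem_range] at hj
      simp only [Function.comp_apply]
      have ha1 : ((m - 1 - j + 1 : Nat) : Int) - 1 = ((m - 1 - j : Nat) : Int) := by
        push_cast; ring
      rw [ha1, PySem.List.pyGetD_natCast]
      rw [PySem.List.pyGetD_neg_natCast _ _ _ (by omega) (by rw [pvGen_length]; omega)]
      rw [← List.getD_eq_getElem _ 0]
      have hidx : (pvGen 1 2 (m + 1)).length - (m - 1 - j + 1) = j + 1 := by
        rw [pvGen_length]; omega
      rw [hidx, pvGen_getD (m + 1) 1 2 (j + 1) (by omega)]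
      have hc : m + 1 - 1 - (j + 1) = m - 1 - j := by omega
      rw [hc]
    · simp only [Function.comp_apply]
      have h0a : ((0 : Nat) : Int) - 1 = (-1 : Int) := by simp
      have h0b : (-((0 : Nat) : Int)) = (0 : Int) := by simp
      rw [h0a, h0b]
      have hlne : l ≠ [] := by
        intro h; rw [h] at hm; simp at hm
      rw [PySem.List.pyGetD_neg_one _ _ hlne, PySem.List.pyGetD_zero]
      have hlast : l.getLast hlne = l.getD (m + 1 - 1 - 0) ' ' := by
        rw [List.getLast_eq_getElem, List.getD_eq_getElem _ ' ' (by omega)]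
        congr 1; omega
      have hG0 : (pvGen 1 2 (m + 1)).getD 0 0 = pvW 1 2 0 := pvGen_getD (m + 1) 1 2 0 (by omega)
      rw [hlast, hG0]

theorem convert_decimal_spec_aux (num : String) :
    convert_decimal num = convert_decimal_alt num := by
  unfold convert_decimal
  have hfib : ((PySem.List.pyGet? (pvFibLoop 1 1 [] (num.toList.length + 1)) 0).bind
      (fun v => PySem.List.remove? (pvFibLoop 1 1 [] (num.toList.length + 1)) v)).getD []
      = pvGen 1 2 num.toList.length := by
    rw [pvFibLoop_eq]
    show ((PySem.List.pyGet? (1 :: pvGen 1 2 num.toList.length) 0).bind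
      (fun v => PySem.List.remove? (1 :: pvGen 1 2 num.toList.length) v)).getD [] = _
    simp [PySem.List.remove?_cons_self]
  simp only [hfib]
  rw [pv_main, alt_eq_sum]

-- ===== VERDICT (by name: the statement is the Claim_ definition above) =====
theorem convert_decimal_spec : Claim_equal_convert_decimal := by
  intro num _
  unfold Spec_convert_decimal
  exact convert_decimal_spec_aux num
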